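-- pv_equiv track=rewrite | github.com/jramell/TestDrivenDevelopment_Exercise1 | ArrayStatistics.py | numElemsIter3
-- ===== SOURCE A (Python) =====
-- def numElemsIter3(stringWithCommaSeparatedNumbers):
--     if(stringWithCommaSeparatedNumbers == ""):
--         return [0, -1, -1]
--     else:
--         numbers = stringWithCommaSeparatedNumbers.split(",")
--         minimum = int(numbers[0])
--         maximum = int(numbers[0])
--         for number in numbers:
--             minimum = min(int(number), minimum)
--             maximum = max(int(number), maximum)
--
--         return [len(numbers), minimum, maximum]
-- ===== SOURCE B (Python) =====
-- def numElemsIter3(stringWithCommaSeparatedNumbers):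
--     if stringWithCommaSeparatedNumbers == "":
--         return [0, -1, -1]
--     nums = [int(x) for x in stringWithCommaSeparatedNumbers.split(",")]
--     return [len(nums), min(nums), max(nums)]
-- ===== Notes on version B (the rewrite author's own statement) =====
-- stated objective: idiomatic
-- what changed: A runs one combined loop carrying running min and max seeded from the first element; B parses all pieces once into a list and takes len/min/max with three separate built-in scans.
import Mathlib
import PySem

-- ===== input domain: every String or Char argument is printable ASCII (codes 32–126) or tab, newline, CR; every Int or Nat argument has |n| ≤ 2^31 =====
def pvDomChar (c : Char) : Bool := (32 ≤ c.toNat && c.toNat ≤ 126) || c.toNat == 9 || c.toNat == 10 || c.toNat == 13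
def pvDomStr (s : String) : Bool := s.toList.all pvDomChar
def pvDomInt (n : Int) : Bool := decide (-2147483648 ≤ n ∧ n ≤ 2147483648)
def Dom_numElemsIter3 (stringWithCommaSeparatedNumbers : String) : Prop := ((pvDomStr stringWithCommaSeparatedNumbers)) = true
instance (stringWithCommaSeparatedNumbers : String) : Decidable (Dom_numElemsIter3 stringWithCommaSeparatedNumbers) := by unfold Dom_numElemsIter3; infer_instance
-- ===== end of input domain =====

-- B parses the comma-separated pieces once into a list and returns len/min/max via
-- three separate built-in scans, instead of A's single combined loop with running min/max (objective: idiomatic).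


-- ===== PORT A =====
def numElemsIter3 (stringWithCommaSeparatedNumbers : String) : List Int :=
  if stringWithCommaSeparatedNumbers == "" then [0, -1, -1]
  else
    let numbers := PySem.Chars.splitOn stringWithCommaSeparatedNumbers.toList [',']
    -- int(numbers[0]); getD 0 is unreachable under Pre_ (the piece parses)
    let minimum := (PySem.Int.ofChars? (numbers.headD [])).getD 0
    let maximum := minimum
    let mm := numbers.foldl (fun (acc : Int × Int) number =>
        (min ((PySem.Int.ofChars? number).getD 0) acc.1,
         max ((PySem.Int.ofChars? number).getD 0) acc.2)) (minimum, maximum)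
    [(numbers.length : Int), mm.1, mm.2]

-- ===== PORT B =====
def numElemsIter3_alt (stringWithCommaSeparatedNumbers : String) : List Int :=
  if stringWithCommaSeparatedNumbers == "" then [0, -1, -1]
  else
    let nums := (PySem.Chars.splitOn stringWithCommaSeparatedNumbers.toList [',']).map
        (fun x => (PySem.Int.ofChars? x).getD 0)
    [(nums.length : Int),
     (PySem.List.min? nums (fun y => y)).getD 0,
     (PySem.List.max? nums (fun y => y)).getD 0]

-- ===== PRECONDITION & SPEC =====
-- Pre_ excludes exactly the inputs where Python's int() raises ValueError on some piece.
def Pre_numElemsIter3 (stringWithCommaSeparatedNumbers : String) : Prop :=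
  stringWithCommaSeparatedNumbers = "" ∨
    ∀ p ∈ PySem.Chars.splitOn stringWithCommaSeparatedNumbers.toList [','],
      (PySem.Int.ofChars? p).isSome = true
instance (stringWithCommaSeparatedNumbers : String) : Decidable (Pre_numElemsIter3 stringWithCommaSeparatedNumbers) := by unfold Pre_numElemsIter3; infer_instance
def pvWitness_numElemsIter3 : String := "5,-3,7"
def Spec_numElemsIter3 (stringWithCommaSeparatedNumbers : String) (out : List Int) : Prop := out = numElemsIter3_alt stringWithCommaSeparatedNumbers
instance (stringWithCommaSeparatedNumbers : String) (out : List Int) : Decidable (Spec_numElemsIter3 stringWithCommaSeparatedNumbers out) := by unfold Spec_numElemsIter3; infer_instance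

-- ===== CLAIM (what is proved, stated in full; the proofs are below) =====
def Claim_equal_numElemsIter3 : Prop := ∀ (stringWithCommaSeparatedNumbers : String), Dom_numElemsIter3 stringWithCommaSeparatedNumbers → Pre_numElemsIter3 stringWithCommaSeparatedNumbers → Spec_numElemsIter3 stringWithCommaSeparatedNumbers (numElemsIter3 stringWithCommaSeparatedNumbers)

-- ===== LEMMAS AND PROOFS =====
theorem pv_go_ne_nil (sep : List Char) (fuel : Nat) (l cur : List Char) (acc : List (List Char)) :
    PySem.Chars.splitOn.go sep fuel l cur acc ≠ [] := by
  induction fuel generalizing l cur acc with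
  | zero => simp [PySem.Chars.splitOn.go]
  | succ n ih =>
    cases l with
    | nil => simp [PySem.Chars.splitOn.go]
    | cons c rest =>
      rw [PySem.Chars.splitOn.go]
      split_ifs <;> apply ih

theorem pv_splitOn_ne_nil (s sep : List Char) : PySem.Chars.splitOn s sep ≠ [] := by
  rw [PySem.Chars.splitOn]; exact pv_go_ne_nil _ _ _ _ _

-- A's combined pair-fold equals the two separate folds over the parsed values
theorem pv_pair_fold (t : List (List Char)) (a b : Int) :
    t.foldl (fun (acc : Int × Int) number =>
        (min ((PySem.Int.ofChars? number).getD 0) acc.1,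
         max ((PySem.Int.ofChars? number).getD 0) acc.2)) (a, b)
      = ((t.map (fun x => (PySem.Int.ofChars? x).getD 0)).foldl min a,
         (t.map (fun x => (PySem.Int.ofChars? x).getD 0)).foldl max b) := by
  induction t generalizing a b with
  | nil => rfl
  | cons x xs ih =>
    simp only [List.foldl_cons, List.map_cons, ih]
    rw [min_comm, max_comm]

theorem numElemsIter3_eq_alt (s : String) : numElemsIter3 s = numElemsIter3_alt s := by
  unfold numElemsIter3 numElemsIter3_alt
  by_cases h : s == ""
  · simp [h]
  · simp only [h, Bool.false_eq_true, if_false]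
    obtain ⟨x, t, hxt⟩ : ∃ x t, PySem.Chars.splitOn s.toList [','] = x :: t := by
      cases hsp : PySem.Chars.splitOn s.toList [','] with
      | nil => exact absurd hsp (pv_splitOn_ne_nil _ _)
      | cons x t => exact ⟨x, t, rfl⟩
    simp only [hxt, List.headD_cons, List.foldl_cons, List.map_cons, List.length_cons,
      List.length_map, min_self, max_self, pv_pair_fold,
      PySem.List.min?_id_cons, PySem.List.max?_id_cons, Option.getD_some]

-- ===== VERDICT (by name: the statement is the Claim_ definition above) =====
theorem numElemsIter3_spec : Claim_equal_numElemsIter3 := by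
  intro s _ _
  exact numElemsIter3_eq_alt s
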